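-- pv_equiv track=rewrite | github.com/RainbowPigCake/TruthTable | main.py | clean_bedmas
-- ===== SOURCE A (Python) =====
-- def clean_bedmas(s):
-- 	# adds * symbols for the and operation EX: AB -> A*B and removes ALL spaces
-- 	indices = []
-- 	s = s.replace(' ','')
-- 	for i in range(len(s)-1):
-- 		if s[i] != '(' and s[i] in alphaset and s[i+1] in alphaset:
-- 			indices.append(str(s[i]) + str(s[i+1]))
-- 		elif s[i] == ')' and s[i+1] in alphaset:
-- 			indices.append(str(s[i]) + str(s[i+1]))
-- 	for i in indices:
-- 		s = s.replace(i, i[0] + "*" + i[1])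
-- 	return s
--
-- alphaset = {'A','B','C','D','E','F','G','H','I','J','K','L','M' ,  'N',	'O'    ,'P','Q','R','S'  , 'T'    ,'U','V','W','X','Y','Z', '('}
-- ===== SOURCE B (Python) =====
-- def clean_bedmas(s):
--     # single left-to-right pass: skip spaces, insert '*' between an uppercase/')' and an uppercase/'('
--     out = []
--     prev = ''
--     for ch in s:
--         if ch == ' ':
--             continue
--         if prev and ('A' <= prev <= 'Z' or prev == ')') and ('A' <= ch <= 'Z' or ch == '('):
--             out.append('*')
--         out.append(ch)
--         prev = ch
--     return ''.join(out)
-- ===== Notes on version B (the rewrite author's own statement) =====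
-- stated objective: alternative
-- what changed: Replaced A's two-phase scheme (collect adjacent-pair substrings, then repeatedly call global str.replace for each pair) by a single left-to-right pass that skips spaces and inserts the product sign at each boundary whose left char is an uppercase letter or closing parenthesis and whose right char is an uppercase letter or opening parenthesis.
import Mathlib
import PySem

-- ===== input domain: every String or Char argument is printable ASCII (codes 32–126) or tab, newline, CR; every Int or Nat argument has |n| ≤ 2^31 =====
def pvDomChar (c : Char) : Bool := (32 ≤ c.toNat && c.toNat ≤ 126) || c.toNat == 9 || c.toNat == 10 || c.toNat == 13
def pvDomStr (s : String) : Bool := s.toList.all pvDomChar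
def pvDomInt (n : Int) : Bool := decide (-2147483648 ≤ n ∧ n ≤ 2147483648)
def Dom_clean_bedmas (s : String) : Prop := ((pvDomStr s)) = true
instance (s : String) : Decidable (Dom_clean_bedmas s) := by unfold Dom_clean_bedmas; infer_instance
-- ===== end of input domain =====

-- B replaces A's collect-pairs-then-repeated-global-str.replace scheme by one single left-to-right
-- pass (skip spaces, insert the product sign at each implicit-AND boundary); objective: alternative.


-- ===== PORT A =====
def alphaset : PySem.Set Char :=
  PySem.Set.ofList ['A','B','C','D','E','F','G','H','I','J','K','L','M','N','O','P','Q','R','S','T','U','V','W','X','Y','Z','(']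

def clean_bedmas (s : String) : String :=
  -- s = s.replace(' ','')
  let s1 := PySem.Str.replace s " " ""
  -- for i in range(len(s)-1): build indices (pairs kept as their two characters)
  let indices : List (Char × Char) :=
    (PySem.List.pyRange 0 (PySem.Str.len s1 - 1) 1).foldl (fun idxs i =>
      match PySem.Str.pyGet? s1 i, PySem.Str.pyGet? s1 (i + 1) with
      | some a, some b =>
        if a ≠ '(' ∧ a ∈ alphaset ∧ b ∈ alphaset then idxs ++ [(a, b)]
        else if a = ')' ∧ b ∈ alphaset then idxs ++ [(a, b)]
        else idxs
      | _, _ => idxs) []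
  -- for i in indices: s = s.replace(i, i[0] + "*" + i[1])
  indices.foldl (fun u p =>
    PySem.Str.replace u (String.ofList [p.1, p.2]) (String.ofList [p.1, '*', p.2])) s1

-- ===== PORT B =====
def clean_bedmas_alt (s : String) : String :=
  let step : List Char × Option Char → Char → List Char × Option Char := fun st ch =>
    if ch = ' ' then st
    else
      match st.2 with
      | some p =>
        if (('A' ≤ p ∧ p ≤ 'Z') ∨ p = ')') ∧ (('A' ≤ ch ∧ ch ≤ 'Z') ∨ ch = '(') then
          (st.1 ++ ['*', ch], some ch)
        else (st.1 ++ [ch], some ch)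
      | none => (st.1 ++ [ch], some ch)
  String.ofList (s.toList.foldl step ([], none)).1

-- ===== PRECONDITION & SPEC =====
def Spec_clean_bedmas (s : String) (out : String) : Prop := out = clean_bedmas_alt s
instance (s : String) (out : String) : Decidable (Spec_clean_bedmas s out) := by unfold Spec_clean_bedmas; infer_instance

-- ===== CLAIM (what is proved, stated in full; the proofs are below) =====
def Claim_equal_clean_bedmas : Prop := ∀ (s : String), Dom_clean_bedmas s → Spec_clean_bedmas s (clean_bedmas s)

-- ===== LEMMAS AND PROOFS =====

-- character classes: left of an implicit product (uppercase or ')'), right of one (uppercase or '(')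
def Lb (c : Char) : Bool := ('A' ≤ c && c ≤ 'Z') || c == ')'
def Rb (c : Char) : Bool := ('A' ≤ c && c ≤ 'Z') || c == '('

-- what one global  u.replace(xy, x*y)  does to a char list (greedy non-overlapping, left-to-right)
def rep2 (x y : Char) : List Char → List Char
  | c :: c' :: r =>
    if c = x ∧ c' = y then c :: '*' :: c' :: rep2 x y r
    else c :: rep2 x y (c' :: r)
  | l => l

-- partially-starred strings: (c, b) means char c, followed by an inserted '*' iff b
def weave (w : List (Char × Bool)) : List Char :=
  w.flatMap (fun cb => cb.1 :: if cb.2 then ['*'] else [])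

-- the effect of rep2 x y on weave w, expressed on the flag list
def mark (x y : Char) : List (Char × Bool) → List (Char × Bool)
  | (c, b) :: (c', b') :: r =>
    if b = false ∧ c = x ∧ c' = y then (c, true) :: (c', b') :: mark x y r
    else (c, b) :: mark x y ((c', b') :: r)
  | l => l

-- B's insertion pass in pure form: chars emitted after previous char p, and from scratch
def insFrom (p : Char) : List Char → List Char
  | c :: r => (if Lb p && Rb c then ['*'] else []) ++ c :: insFrom c r
  | [] => []

def insA : List Char → List Char
  | [] => []
  | c :: r => c :: insFrom c r

-- is boundary i of t hot (a '*' is to be inserted there)?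
def hotB (t : List Char) (i : Nat) : Bool :=
  match t[i]?, t[i+1]? with
  | some a, some b => Lb a && Rb b
  | _, _ => false

-- the pairs A collects, from position k on
def pairsFrom (t : List Char) (k : Nat) : List (Char × Char) :=
  if h : k + 1 < t.length then
    (if hotB t k then [(t[k], t[k+1])] else []) ++ pairsFrom t (k+1)
  else []
termination_by t.length - k

def flagged (w : List (Char × Bool)) (j : Nat) : Prop := ∃ c, w[j]? = some (c, true)

def good (w : List (Char × Bool)) : Prop :=
  ∀ j c, w[j]? = some (c, true) → ∃ d b', w[j+1]? = some (d, b') ∧ Lb c = true ∧ Rb d = true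

theorem go_space (fuel : Nat) (l acc : List Char) (h : l.length ≤ fuel) :
    PySem.Chars.replace.go [' '] [] fuel l acc = acc.reverse ++ l.filter (· ≠ ' ') := by
  induction fuel generalizing l acc with
  | zero =>
    interval_cases hl : l.length
    · simp_all [List.length_eq_zero_iff.mp hl, PySem.Chars.replace.go]
  | succ n ih =>
    match l with
    | [] => simp [PySem.Chars.replace.go]
    | c :: t =>
      simp only [PySem.Chars.replace.go]
      by_cases hc : c = ' '
      · subst hc
        have : [' '].isPrefixOf (' ' :: t) = true := by simp [List.isPrefixOf]
        simp only [this, if_pos rfl]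
        rw [ih _ _ (by simpa using Nat.le_of_succ_le_succ h)]
        simp
      · have : [' '].isPrefixOf (c :: t) = false := by
          simp [List.isPrefixOf]; exact fun hh => (hc hh.symm).elim
        simp only [this]
        rw [if_neg (by simp [this])]
        rw [ih _ _ (by simpa using Nat.le_of_succ_le_succ h)]
        simp [hc]

theorem replace_space (l : List Char) :
    PySem.Chars.replace l [' '] [] = l.filter (· ≠ ' ') := by
  rw [PySem.Chars.replace]
  simp only [List.isEmpty_iff, reduceCtorEq, if_false]
  rw [go_space l.length l [] le_rfl]
  simp

theorem go_rep2 (x y : Char) (fuel : Nat) (l acc : List Char) (h : l.length ≤ fuel) :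
    PySem.Chars.replace.go [x, y] [x, '*', y] fuel l acc = acc.reverse ++ rep2 x y l := by
  induction fuel generalizing l acc with
  | zero =>
    have : l = [] := List.length_eq_zero_iff.mp (Nat.le_zero.mp h)
    subst this; simp [PySem.Chars.replace.go, rep2]
  | succ n ih =>
    match l with
    | [] => simp [PySem.Chars.replace.go, rep2]
    | [c] =>
      have hp : [x, y].isPrefixOf [c] = false := by
        simp [List.isPrefixOf]
      simp only [PySem.Chars.replace.go, hp, if_neg, Bool.false_eq_true, if_false]
      rw [ih [] _ (by simp)]
      simp [rep2]
    | c :: c' :: r =>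
      simp only [PySem.Chars.replace.go]
      by_cases hm : c = x ∧ c' = y
      · obtain ⟨rfl, rfl⟩ := hm
        have hp : [c, c'].isPrefixOf (c :: c' :: r) = true := by simp [List.isPrefixOf]
        simp only [hp, if_true, List.length_cons, List.drop_succ_cons, List.drop_zero, List.length_nil, Nat.zero_add, if_pos trivial]
        rw [ih r _ (by simp at h ⊢; omega)]
        simp [rep2]
      · have hp : [x, y].isPrefixOf (c :: c' :: r) = false := by
          simp [List.isPrefixOf]
          intro h1 h2; exact hm ⟨h1.symm, h2.symm⟩
        simp only [hp, Bool.false_eq_true, if_false]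
        rw [ih (c' :: r) _ (by simp at h ⊢; omega)]
        simp [rep2, hm]

theorem replace_rep2 (x y : Char) (l : List Char) :
    PySem.Chars.replace l [x, y] [x, '*', y] = rep2 x y l := by
  rw [PySem.Chars.replace]
  simp only [List.isEmpty_iff, reduceCtorEq, if_false]
  rw [go_rep2 x y l.length l [] le_rfl]
  simp

theorem rep2_star (x y : Char) (hx : x ≠ '*') (l : List Char) :
    rep2 x y ('*' :: l) = '*' :: rep2 x y l := by
  match l with
  | [] => simp [rep2]
  | c :: r =>
    rw [rep2]
    rw [if_neg (by rintro ⟨h1, h2⟩; exact hx h1.symm)]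

theorem weave_cons_false (c : Char) (w : List (Char × Bool)) :
    weave ((c, false) :: w) = c :: weave w := by simp [weave]

theorem weave_cons_true (c : Char) (w : List (Char × Bool)) :
    weave ((c, true) :: w) = c :: '*' :: weave w := by simp [weave]

theorem rep2_weave (x y : Char) (hx : x ≠ '*') (hy : y ≠ '*') (w : List (Char × Bool)) :
    rep2 x y (weave w) = weave (mark x y w) := by
  induction w using mark.induct x y with
  | case1 c b c' b' r hm ih =>
    obtain ⟨rfl, rfl, rfl⟩ := hm
    rw [mark, if_pos ⟨rfl, rfl, rfl⟩, weave_cons_false, weave_cons_true]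
    cases b' with
    | false =>
      rw [weave_cons_false, weave_cons_false, rep2, if_pos ⟨rfl, rfl⟩, ih]
    | true =>
      rw [weave_cons_true, weave_cons_true, rep2, if_pos ⟨rfl, rfl⟩, rep2_star _ _ hx, ih]
  | case2 c b c' b' r hm ih =>
    rw [mark, if_neg hm]
    cases b with
    | true =>
      rw [weave_cons_true, weave_cons_true, rep2,
        if_neg (by rintro ⟨h1, h2⟩; exact hy h2.symm), rep2_star _ _ hx, ih]
    | false =>
      have hne : ¬(c = x ∧ c' = y) := fun ⟨h1, h2⟩ => hm ⟨rfl, h1, h2⟩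
      rw [weave_cons_false, weave_cons_false]
      cases b' with
      | false => rw [weave_cons_false, rep2, if_neg hne, ← weave_cons_false c' r, ih]
      | true => rw [weave_cons_true, rep2, if_neg hne, ← weave_cons_true c' r, ih]
  | case3 l h1 =>
    match l with
    | [] => rfl
    | [(c, b)] =>
      cases b with
      | false => simp [mark, weave, rep2]
      | true =>
        rw [show mark x y [(c, true)] = [(c, true)] from by simp [mark], weave_cons_true]
        rw [rep2, if_neg (by rintro ⟨h1', h2⟩; exact hy h2.symm), rep2_star _ _ hx]
        simp [rep2, weave]
    | (c, b) :: (c', b') :: r => exact absurd rfl (h1 c b c' b' r)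

theorem mark_fst (x y : Char) (w : List (Char × Bool)) :
    (mark x y w).map Prod.fst = w.map Prod.fst := by
  induction w using mark.induct x y with
  | case1 c b c' b' r hm ih =>
    obtain ⟨rfl, hc, hc'⟩ := hm
    rw [mark, if_pos ⟨rfl, hc, hc'⟩]
    simpa using ih
  | case2 c b c' b' r hm ih =>
    rw [mark, if_neg hm]
    simpa using ih
  | case3 l h1 =>
    match l with
    | [] => rfl
    | [(c, b)] => rfl
    | (c, b) :: (c', b') :: r => exact absurd rfl (h1 c b c' b' r)

theorem mark_mono (x y : Char) (w : List (Char × Bool)) :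
    ∀ (j : Nat) (c : Char), w[j]? = some (c, true) → (mark x y w)[j]? = some (c, true) := by
  induction w using mark.induct x y with
  | case1 c b c' b' r hm ih =>
    obtain ⟨rfl, hc, hc'⟩ := hm
    rw [mark, if_pos ⟨rfl, hc, hc'⟩]
    intro j c0 h
    match j with
    | 0 => simp at h
    | 1 => simpa using h
    | (j+2) => simpa using ih j c0 (by simpa using h)
  | case2 c b c' b' r hm ih =>
    rw [mark, if_neg hm]
    intro j c0 h
    match j with
    | 0 => simpa using h
    | (j+1) => simpa using ih j c0 (by simpa using h)
  | case3 l h1 =>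
    intro j c0 h
    match l with
    | [] => simpa [mark] using h
    | [(c, b)] => simpa [mark] using h
    | (c, b) :: (c', b') :: r => exact absurd rfl (h1 c b c' b' r)

theorem mark_sound (x y : Char) (w : List (Char × Bool)) :
    ∀ (j : Nat) (c : Char), (mark x y w)[j]? = some (c, true) →
      w[j]? = some (c, true) ∨ (c = x ∧ w[j]? = some (x, false) ∧ ∃ b, w[j+1]? = some (y, b)) := by
  induction w using mark.induct x y with
  | case1 c b c' b' r hm ih =>
    obtain ⟨rfl, hc, hc'⟩ := hm
    rw [mark, if_pos ⟨rfl, hc, hc'⟩]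
    intro j c0 h
    match j with
    | 0 =>
      right
      simp only [List.getElem?_cons_zero, Option.some.injEq, Prod.mk.injEq, and_true] at h
      subst h
      exact ⟨hc, by simp [hc], ⟨b', by simp [hc']⟩⟩
    | 1 => left; simpa using h
    | (j+2) =>
      rcases ih j c0 (by simpa using h) with h' | ⟨rfl, h1, b0, h2⟩
      · left; simpa using h'
      · right; exact ⟨rfl, by simpa using h1, b0, by simpa using h2⟩
  | case2 c b c' b' r hm ih =>
    rw [mark, if_neg hm]
    intro j c0 h
    match j with
    | 0 => left; simpa using h
    | (j+1) =>
      rcases ih j c0 (by simpa using h) with h' | ⟨rfl, h1, b0, h2⟩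
      · left; simpa using h'
      · right; exact ⟨rfl, by simpa using h1, b0, by simpa using h2⟩
  | case3 l h1 =>
    intro j c0 h
    match l with
    | [] => left; simpa [mark] using h
    | [(c, b)] => left; simpa [mark] using h
    | (c, b) :: (c', b') :: r => exact absurd rfl (h1 c b c' b' r)

theorem mark_progress (x y : Char) (w : List (Char × Bool)) :
    ∀ (i : Nat), w[i]? = some (x, false) → (∃ b, w[i+1]? = some (y, b)) →
      (i = 0 ∨ x ≠ y ∨ w[i-1]? ≠ some (x, false)) →
      (mark x y w)[i]? = some (x, true) := by
  induction w using mark.induct x y with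
  | case1 c b c' b' r hm ih =>
    obtain ⟨rfl, hc, hc'⟩ := hm
    rw [mark, if_pos ⟨rfl, hc, hc'⟩]
    intro i h1 h2 hH
    match i with
    | 0 => simp [hc]
    | 1 =>
      exfalso
      simp only [List.getElem?_cons_succ, List.getElem?_cons_zero, Option.some.injEq,
        Prod.mk.injEq] at h1
      rcases hH with h | h | h
      · omega
      · exact h (h1.1 ▸ hc'.symm ▸ rfl)
      · exact h (by simp [hc])
    | (i+2) =>
      have h1' : r[i]? = some (x, false) := by simpa using h1
      have h2' : ∃ b0, r[i+1]? = some (y, b0) := by simpa using h2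
      have hH' : i = 0 ∨ x ≠ y ∨ r[i-1]? ≠ some (x, false) := by
        match i with
        | 0 => exact Or.inl rfl
        | (i+1) =>
          rcases hH with h | h | h
          · omega
          · exact Or.inr (Or.inl h)
          · exact Or.inr (Or.inr (by simpa using h))
      simpa using ih i h1' h2' hH'
  | case2 c b c' b' r hm ih =>
    rw [mark, if_neg hm]
    intro i h1 h2 hH
    match i with
    | 0 =>
      exfalso
      simp only [List.getElem?_cons_zero, Option.some.injEq, Prod.mk.injEq] at h1
      obtain ⟨b0, hb0⟩ := h2
      simp only [List.getElem?_cons_succ, List.getElem?_cons_zero, Option.some.injEq,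
        Prod.mk.injEq] at hb0
      exact hm ⟨h1.2, h1.1, hb0.1⟩
    | (i+1) =>
      have h1' : ((c', b') :: r)[i]? = some (x, false) := by simpa using h1
      have h2' : ∃ b0, ((c', b') :: r)[i+1]? = some (y, b0) := by simpa using h2
      have hH' : i = 0 ∨ x ≠ y ∨ ((c', b') :: r)[i-1]? ≠ some (x, false) := by
        match i with
        | 0 => exact Or.inl rfl
        | (i+1) =>
          rcases hH with h | h | h
          · omega
          · exact Or.inr (Or.inl h)
          · exact Or.inr (Or.inr (by simpa using h))
      simpa using ih i h1' h2' hH'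
  | case3 l h1 =>
    intro i hi h2 hH
    match l with
    | [] => simp at hi
    | [(c, b)] =>
      obtain ⟨b0, hb0⟩ := h2
      rw [show (1 : Nat) = 0 + 1 from rfl] at hb0
      simp at hb0
    | (c, b) :: (c', b') :: r => exact absurd rfl (h1 c b c' b' r)

theorem mem_alphaset (a : Char) : a ∈ alphaset ↔ (('A' ≤ a ∧ a ≤ 'Z') ∨ a = '(') := by
  constructor
  · intro h
    simp only [alphaset, PySem.Set.mem_ofList, List.mem_cons, List.not_mem_nil, or_false] at h
    rcases h with rfl|rfl|rfl|rfl|rfl|rfl|rfl|rfl|rfl|rfl|rfl|rfl|rfl|rfl|rfl|rfl|rfl|rfl|rfl|rfl|rfl|rfl|rfl|rfl|rfl|rfl|rfl <;> decide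
  · intro h
    simp only [alphaset, PySem.Set.mem_ofList, List.mem_cons, List.not_mem_nil, or_false]
    rcases h with ⟨h1, h2⟩ | rfl
    · have hlo : 65 ≤ a.toNat := h1
      have hhi : a.toNat ≤ 90 := h2
      have he : a = Char.ofNat a.toNat := by
        rw [Char.ofNat_toNat]
      rw [he]
      interval_cases h : a.toNat <;> decide
    · decide

theorem branch_eq (a b : Char) (acc : List (Char × Char)) :
    (if a ≠ '(' ∧ a ∈ alphaset ∧ b ∈ alphaset then acc ++ [(a, b)]
     else if a = ')' ∧ b ∈ alphaset then acc ++ [(a, b)]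
     else acc)
    = acc ++ (if Lb a && Rb b then [(a, b)] else []) := by
  by_cases hb : b ∈ alphaset
  · by_cases ha1 : a ≠ '(' ∧ a ∈ alphaset
    · rw [if_pos ⟨ha1.1, ha1.2, hb⟩, if_pos ?_]
      have := (mem_alphaset a).mp ha1.2
      have hbb := (mem_alphaset b).mp hb
      simp only [Lb, Rb]
      rcases this with h | rfl
      · simp only [Bool.or_eq_true, Bool.and_eq_true, decide_eq_true_eq]
        constructor
        · left; exact ⟨h.1, h.2⟩
        · rcases hbb with h' | rfl
          · left; exact ⟨h'.1, h'.2⟩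
          · right; rfl
      · exact absurd rfl ha1.1
    · by_cases ha2 : a = ')'
      · subst ha2
        rw [if_neg (by rintro ⟨h1, h2, h3⟩; exact ha1 ⟨h1, h2⟩), if_pos ⟨rfl, hb⟩, if_pos ?_]
        have hbb := (mem_alphaset b).mp hb
        simp only [Lb, Rb]
        simp only [Bool.or_eq_true, Bool.and_eq_true, decide_eq_true_eq]
        constructor
        · right; rfl
        · rcases hbb with h' | rfl
          · left; exact ⟨h'.1, h'.2⟩
          · right; rfl
      · rw [if_neg (by rintro ⟨h1, h2, h3⟩; exact ha1 ⟨h1, h2⟩),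
           if_neg (by rintro ⟨h1, h2⟩; exact ha2 h1), if_neg ?_, List.append_nil]
        simp only [Lb, Bool.or_eq_true, Bool.and_eq_true, decide_eq_true_eq, beq_iff_eq]
        rintro ⟨h1 | h1, h2⟩
        · exact ha1 (by
            constructor
            · rintro rfl; exact absurd h1.1 (by decide)
            · exact (mem_alphaset a).mpr (Or.inl h1))
        · exact ha2 h1
  · have hrb : Rb b = false := by
      simp only [Rb, Bool.or_eq_false_iff, Bool.and_eq_false_iff]
      constructor
      · by_contra hcon
        simp only [not_or, Bool.not_eq_false, decide_eq_true_eq] at hcon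
        exact hb ((mem_alphaset b).mpr (Or.inl hcon))
      · by_contra hcon
        simp only [Bool.not_eq_false, beq_iff_eq] at hcon
        exact hb ((mem_alphaset b).mpr (Or.inr hcon))
    rw [if_neg (by rintro ⟨h1, h2, h3⟩; exact hb h3),
        if_neg (by rintro ⟨h1, h2⟩; exact hb h2), if_neg (by simp [hrb]), List.append_nil]

theorem hotB_eq (t : List Char) (k : Nat) (a b : Char)
    (h1 : t[k]? = some a) (h2 : t[k+1]? = some b) : hotB t k = (Lb a && Rb b) := by
  simp [hotB, h1, h2]

theorem pairsFrom_mem (t : List Char) (k : Nat) (p : Char × Char) (hp : p ∈ pairsFrom t k) :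
    Lb p.1 = true ∧ Rb p.2 = true := by
  induction k using pairsFrom.induct t generalizing p with
  | case1 k h ih =>
    rw [pairsFrom, dif_pos h] at hp
    rcases List.mem_append.mp hp with h' | h'
    · have hk : k < t.length := by omega
      by_cases hh : hotB t k = true
      · rw [if_pos hh] at h'
        simp only [List.mem_singleton] at h'
        subst h'
        rw [hotB_eq t k t[k] t[k+1] (List.getElem?_eq_getElem hk)
          (List.getElem?_eq_getElem h)] at hh
        simpa using hh
      · rw [if_neg hh] at h'; simp at h'
    · exact ih _ h'
  | case2 k h =>
    rw [pairsFrom, dif_neg h] at hp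
    simp at hp

theorem indicesA (s1 : String) (k : Nat) (acc : List (Char × Char)) :
    (PySem.List.pyRange (k : Int) (PySem.Str.len s1 - 1) 1).foldl (fun idxs i =>
      match PySem.Str.pyGet? s1 i, PySem.Str.pyGet? s1 (i + 1) with
      | some a, some b =>
        if a ≠ '(' ∧ a ∈ alphaset ∧ b ∈ alphaset then idxs ++ [(a, b)]
        else if a = ')' ∧ b ∈ alphaset then idxs ++ [(a, b)]
        else idxs
      | _, _ => idxs) acc = acc ++ pairsFrom s1.toList k := by
  rw [PySem.Str.len_eq]
  induction k using pairsFrom.induct s1.toList generalizing acc with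
  | case1 k h ih =>
    rw [PySem.List.pyRange_one_cons (by omega), List.foldl_cons]
    have hk : k < s1.toList.length := by omega
    have g1 : PySem.Str.pyGet? s1 (k : Int) = some s1.toList[k] := by
      rw [PySem.Str.pyGet?_natCast, List.getElem?_eq_getElem hk]
    have g2 : PySem.Str.pyGet? s1 ((k : Int) + 1) = some s1.toList[k+1] := by
      rw [show ((k : Int) + 1) = ((k+1 : Nat) : Int) by push_cast; ring,
        PySem.Str.pyGet?_natCast, List.getElem?_eq_getElem h]
    rw [show ((k : Int) + 1) = ((k+1 : Nat) : Int) by push_cast; ring] at *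
    simp only [g1, g2]
    rw [branch_eq s1.toList[k] s1.toList[k+1] acc]
    rw [show pairsFrom s1.toList k =
      (if hotB s1.toList k then [(s1.toList[k], s1.toList[k+1])] else []) ++
        pairsFrom s1.toList (k+1) from by rw [pairsFrom, dif_pos h]]
    rw [ih, hotB_eq s1.toList k s1.toList[k] s1.toList[k+1] (List.getElem?_eq_getElem hk)
      (List.getElem?_eq_getElem h), List.append_assoc]
  | case2 k h =>
    rw [PySem.List.pyRange_one_eq_nil (by omega), List.foldl_nil, pairsFrom, dif_neg h,
      List.append_nil]

theorem Lb_ne_star (c : Char) (h : Lb c = true) : c ≠ '*' := by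
  rintro rfl; simp [Lb] at h

theorem Rb_ne_star (c : Char) (h : Rb c = true) : c ≠ '*' := by
  rintro rfl; simp [Rb] at h

theorem fold_rep2_weave (ps : List (Char × Char)) :
    ∀ (w : List (Char × Bool)), (∀ p ∈ ps, Lb p.1 = true ∧ Rb p.2 = true) →
    ps.foldl (fun u p => rep2 p.1 p.2 u) (weave w) =
      weave (ps.foldl (fun v p => mark p.1 p.2 v) w) := by
  induction ps with
  | nil => intro w _; rfl
  | cons p ps ih =>
    intro w hps
    have hp := hps p (List.mem_cons_self)
    rw [List.foldl_cons, List.foldl_cons,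
      rep2_weave p.1 p.2 (Lb_ne_star _ hp.1) (Rb_ne_star _ hp.2) w]
    exact ih (mark p.1 p.2 w) (fun q hq => hps q (List.mem_cons_of_mem _ hq))

theorem getElem?_fst_eq {w w' : List (Char × Bool)} (h : w'.map Prod.fst = w.map Prod.fst)
    (j : Nat) : (w'[j]?).map Prod.fst = (w[j]?).map Prod.fst := by
  rw [← List.getElem?_map, ← List.getElem?_map, h]

theorem hotB_lt (t : List Char) (j : Nat) (h : hotB t j = true) : j + 1 < t.length := by
  by_contra hcon
  have h2 : t[j+1]? = none := List.getElem?_eq_none (by omega)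
  rcases h1 : t[j]? with _ | a <;> simp [hotB, h1, h2] at h

theorem fold_mark_invariant (t : List Char) (k : Nat) :
    ∀ (w : List (Char × Bool)), w.map Prod.fst = t → good w →
    (∀ j, hotB t j = true → k ≤ j ∨ flagged w j) →
    (((pairsFrom t k).foldl (fun v p => mark p.1 p.2 v) w).map Prod.fst = t ∧
     good ((pairsFrom t k).foldl (fun v p => mark p.1 p.2 v) w) ∧
     ∀ j, hotB t j = true → flagged ((pairsFrom t k).foldl (fun v p => mark p.1 p.2 v) w) j) := by
  induction k using pairsFrom.induct t with
  | case2 k h =>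
    intro w hfst hg hflag
    rw [pairsFrom, dif_neg h, List.foldl_nil]
    refine ⟨hfst, hg, fun j hj => ?_⟩
    rcases hflag j hj with hk | hf
    · exact absurd (hotB_lt t j hj) (by subst hfst; simp at h ⊢; omega)
    · exact hf
  | case1 k h ih =>
    intro w hfst hg hflag
    rw [show pairsFrom t k = (if hotB t k then [(t[k], t[k+1])] else []) ++ pairsFrom t (k+1) from
      by rw [pairsFrom, dif_pos h], List.foldl_append]
    by_cases hh : hotB t k = true
    · rw [if_pos hh, List.foldl_cons, List.foldl_nil]
      set x := t[k] with hx
      set y := t[k+1] with hy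
      have hk : k < t.length := by omega
      have hxy : Lb x = true ∧ Rb y = true := by
        have := hotB_lt t k hh
        unfold hotB at hh
        rw [List.getElem?_eq_getElem hk, List.getElem?_eq_getElem (by omega)] at hh
        simpa using hh
      -- facts about w's entries from hfst
      have hfst' : ∀ (j : Nat) (c : Char), t[j]? = some c → ∃ b0, w[j]? = some (c, b0) := by
        intro j c hc
        have hwj : (w[j]?).map Prod.fst = t[j]? := by
          rw [← List.getElem?_map, hfst]
        rw [hc] at hwj
        rcases hw : w[j]? with _ | cb
        · rw [hw] at hwj; simp at hwj
        · obtain ⟨c1, b1⟩ := cb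
          rw [hw] at hwj; simp at hwj
          subst hwj
          exact ⟨b1, rfl⟩
      set w' := mark x y w with hw'
      have hfstw' : w'.map Prod.fst = t := by rw [hw', mark_fst, hfst]
      have hgw' : good w' := by
        intro j c hj
        rcases mark_sound x y w j c hj with hold | ⟨rfl, hjx, b0, hjy⟩
        · obtain ⟨d, b', hd, hLb, hRb⟩ := hg j c hold
          have hfj := getElem?_fst_eq (h := (mark_fst x y w)) (j + 1)
          rw [hd] at hfj
          rcases hw1 : w'[j+1]? with _ | db
          · rw [hw1] at hfj; simp at hfj
          · obtain ⟨d1, b1⟩ := db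
            rw [hw1] at hfj; simp at hfj
            subst hfj
            exact ⟨d1, b1, rfl, hLb, hRb⟩
        · have hfj := getElem?_fst_eq (h := (mark_fst x y w)) (j + 1)
          rw [hjy] at hfj
          rcases hw1 : w'[j+1]? with _ | db
          · rw [hw1] at hfj; simp at hfj
          · obtain ⟨d1, b1⟩ := db
            rw [hw1] at hfj; simp at hfj
            subst hfj
            exact ⟨y, b1, rfl, hxy.1, hxy.2⟩
      have hflagw' : ∀ j, hotB t j = true → k + 1 ≤ j ∨ flagged w' j := by
        intro j hj
        rcases hflag j hj with hk' | hf
        · rcases Nat.lt_or_ge k j with hlt | hge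
          · exact Or.inl hlt
          · -- j = k
            have hjk : j = k := by omega
            subst hjk
            right
            obtain ⟨bk, hbk⟩ := hfst' j (t[j]'hk) (List.getElem?_eq_getElem hk)
            cases bk with
            | true => exact ⟨t[j], mark_mono x y w j t[j] hbk⟩
            | false =>
              refine ⟨x, mark_progress x y w j (by rw [hbk]) ?_ ?_⟩
              · obtain ⟨b1, hb1⟩ := hfst' (j+1) y (by rw [hy]; exact List.getElem?_eq_getElem (by omega))
                exact ⟨b1, hb1⟩
              · rcases Nat.eq_zero_or_pos j with rfl | hpos
                · exact Or.inl rfl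
                · by_cases hxyeq : x = y
                  · right; right
                    intro hcon
                    have hprev : hotB t (j-1) = true := by
                      unfold hotB
                      have h1 : t[j-1]? = some x := by
                        have := getElem?_fst_eq (w' := w) (w := w) rfl (j-1)
                        have hwj : (w[j-1]?).map Prod.fst = t[j-1]? := by
                          rw [← List.getElem?_map, hfst]
                        rw [hcon] at hwj; simp at hwj; rw [← hwj]
                      have h2 : t[(j-1)+1]? = some x := by
                        rw [show j - 1 + 1 = j from by omega, List.getElem?_eq_getElem hk]
                      rw [h1, h2]
                      simp only [Bool.and_eq_true]
                      exact ⟨hxy.1, hxyeq ▸ hxy.2⟩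
                    rcases hflag (j-1) hprev with hk2 | ⟨c2, hc2⟩
                    · omega
                    · rw [hcon] at hc2; simp at hc2
                  · exact Or.inr (Or.inl hxyeq)
        · right
          obtain ⟨c0, hc0⟩ := hf
          exact ⟨c0, mark_mono x y w j c0 hc0⟩
      exact ih w' hfstw' hgw' hflagw'
    · rw [if_neg hh, List.foldl_nil]
      refine ih w hfst hg (fun j hj => ?_)
      rcases hflag j hj with hk' | hf
      · rcases Nat.lt_or_ge k j with hlt | hge
        · exact Or.inl hlt
        · have : j = k := by omega
          subst this
          exact absurd hj hh
      · exact Or.inr hf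

theorem weave_init (t : List Char) : weave (t.map (fun c => (c, false))) = t := by
  induction t with
  | nil => rfl
  | cons c r ih => simp [weave] at ih ⊢; exact ih

theorem good_init (t : List Char) : good (t.map (fun c => (c, false))) := by
  intro j c h
  rw [List.getElem?_map] at h
  rcases ht : t[j]? with _ | a <;> rw [ht] at h <;> simp at h

theorem good_tail (p : Char × Bool) (w : List (Char × Bool)) (hg : good (p :: w)) : good w := by
  intro j c h
  exact hg (j+1) c (by simpa using h)

theorem weave_full (w : List (Char × Bool)) : good w →
    (∀ j, hotB (w.map Prod.fst) j = true → flagged w j) →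
    weave w = insA (w.map Prod.fst) := by
  induction w with
  | nil => intro _ _; rfl
  | cons hd tl ih =>
    intro hg hflag
    obtain ⟨c, b⟩ := hd
    match tl with
    | [] =>
      have hb : b = false := by
        cases b with
        | false => rfl
        | true =>
          obtain ⟨d, b', hd', _⟩ := hg 0 c (by simp)
          simp at hd'
      subst hb
      simp [weave, insA, insFrom]
    | (c', b') :: r =>
      have hhot : hotB ((( c, b) :: (c', b') :: r).map Prod.fst) 0 = (Lb c && Rb c') := by
        simp [hotB]
      by_cases hc : (Lb c && Rb c') = true
      · have hfl : flagged ((c, b) :: (c', b') :: r) 0 := hflag 0 (by rw [hhot, hc])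
        obtain ⟨c0, hc0⟩ := hfl
        simp only [List.getElem?_cons_zero, Option.some.injEq, Prod.mk.injEq] at hc0
        have hb : b = true := by
          cases b
          · simp at hc0
          · rfl
        subst hb
        rw [show weave ((c, true) :: (c', b') :: r) = c :: '*' :: weave ((c', b') :: r) from by
          simp [weave]]
        rw [show ((c, true) :: (c', b') :: r).map Prod.fst = c :: (c' :: r.map Prod.fst) from by
          simp]
        rw [show insA (c :: c' :: r.map Prod.fst) =
          c :: '*' :: insA (c' :: r.map Prod.fst) from by
          simp [insA, insFrom, hc]]
        have := ih (good_tail _ _ hg) (fun j hj => by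
          have h2 := hflag (j+1) (by
            rw [show hotB (((c, true) :: (c', b') :: r).map Prod.fst) (j+1) =
              hotB (((c', b') :: r).map Prod.fst) j from by simp [hotB]]
            exact hj)
          obtain ⟨c1, hc1⟩ := h2
          exact ⟨c1, by simpa using hc1⟩)
        rw [this]
        simp
      · have hb : b = false := by
          cases b with
          | false => rfl
          | true =>
            obtain ⟨d, b1, hd', hLb, hRb⟩ := hg 0 c (by simp)
            simp only [List.getElem?_cons_succ, List.getElem?_cons_zero, Option.some.injEq,
              Prod.mk.injEq] at hd'
            exact absurd (by simp [hLb, ← hd'.1] at hRb ⊢; exact hRb : (Lb c && Rb c') = true) hc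
        subst hb
        rw [show weave ((c, false) :: (c', b') :: r) = c :: weave ((c', b') :: r) from by
          simp [weave]]
        rw [show ((c, false) :: (c', b') :: r).map Prod.fst = c :: (c' :: r.map Prod.fst) from by
          simp]
        rw [show insA (c :: c' :: r.map Prod.fst) = c :: insA (c' :: r.map Prod.fst) from by
          simp [insA, insFrom, hc]]
        have := ih (good_tail _ _ hg) (fun j hj => by
          have h2 := hflag (j+1) (by
            rw [show hotB (((c, false) :: (c', b') :: r).map Prod.fst) (j+1) =
              hotB (((c', b') :: r).map Prod.fst) j from by simp [hotB]]
            exact hj)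
          obtain ⟨c1, hc1⟩ := h2
          exact ⟨c1, by simpa using hc1⟩)
        rw [this]
        simp

theorem cond_iff (p ch : Char) :
    ((('A' ≤ p ∧ p ≤ 'Z') ∨ p = ')') ∧ (('A' ≤ ch ∧ ch ≤ 'Z') ∨ ch = '(')) ↔
      (Lb p && Rb ch) = true := by
  simp [Lb, Rb]

theorem foldB (l : List Char) : ∀ (acc : List Char) (pr : Option Char),
    (l.foldl (fun st ch =>
      if ch = ' ' then st
      else
        match st.2 with
        | some p =>
          if (('A' ≤ p ∧ p ≤ 'Z') ∨ p = ')') ∧ (('A' ≤ ch ∧ ch ≤ 'Z') ∨ ch = '(') then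
            (st.1 ++ ['*', ch], some ch)
          else (st.1 ++ [ch], some ch)
        | none => (st.1 ++ [ch], some ch)) (acc, pr)).1
    = acc ++ (match pr with
              | none => insA (l.filter (· ≠ ' '))
              | some p => insFrom p (l.filter (· ≠ ' '))) := by
  induction l with
  | nil =>
    intro acc pr
    match pr with
    | none => simp [insA]
    | some p => simp [insFrom]
  | cons ch r ih =>
    intro acc pr
    rw [List.foldl_cons]
    by_cases hch : ch = ' '
    · subst hch
      rw [if_pos rfl]
      rw [ih acc pr]
      simp
    · rw [if_neg hch]
      have hfil : (ch :: r).filter (· ≠ ' ') = ch :: r.filter (· ≠ ' ') := by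
        simp [List.filter_cons, hch]
      rw [hfil]
      match pr with
      | none =>
        show (r.foldl _ (acc ++ [ch], some ch)).1 = _
        rw [ih (acc ++ [ch]) (some ch)]
        simp [insA]
      | some p =>
        show (List.foldl _ (if (('A' ≤ p ∧ p ≤ 'Z') ∨ p = ')') ∧ (('A' ≤ ch ∧ ch ≤ 'Z') ∨ ch = '(')
            then (acc ++ ['*', ch], some ch) else (acc ++ [ch], some ch)) r).1 = _
        by_cases hcond : (('A' ≤ p ∧ p ≤ 'Z') ∨ p = ')') ∧ (('A' ≤ ch ∧ ch ≤ 'Z') ∨ ch = '(')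
        · rw [if_pos hcond]
          rw [ih (acc ++ ['*', ch]) (some ch)]
          show acc ++ ['*', ch] ++ insFrom ch (r.filter (· ≠ ' '))
            = acc ++ insFrom p (ch :: r.filter (· ≠ ' '))
          rw [show insFrom p (ch :: r.filter (· ≠ ' ')) =
            (if Lb p && Rb ch then ['*'] else []) ++ ch :: insFrom ch (r.filter (· ≠ ' ')) from
            rfl, if_pos ((cond_iff p ch).mp hcond)]
          simp
        · rw [if_neg hcond]
          rw [ih (acc ++ [ch]) (some ch)]
          show acc ++ [ch] ++ insFrom ch (r.filter (· ≠ ' '))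
            = acc ++ insFrom p (ch :: r.filter (· ≠ ' '))
          rw [show insFrom p (ch :: r.filter (· ≠ ' ')) =
            (if Lb p && Rb ch then ['*'] else []) ++ ch :: insFrom ch (r.filter (· ≠ ' ')) from
            rfl, if_neg (fun hcc => hcond ((cond_iff p ch).mpr hcc))]
          simp

theorem fold_str_replace (ps : List (Char × Char)) : ∀ (u : String),
    ps.foldl (fun u p =>
      PySem.Str.replace u (String.ofList [p.1, p.2]) (String.ofList [p.1, '*', p.2])) u
    = String.ofList (ps.foldl (fun l p => PySem.Chars.replace l [p.1, p.2] [p.1, '*', p.2])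
        u.toList) := by
  induction ps with
  | nil => intro u; rw [List.foldl_nil, List.foldl_nil, String.ofList_toList]
  | cons p ps ih =>
    intro u
    rw [List.foldl_cons, List.foldl_cons, ih]
    congr 1
    rw [show PySem.Str.replace u (String.ofList [p.1, p.2]) (String.ofList [p.1, '*', p.2]) =
      String.ofList (PySem.Chars.replace u.toList [p.1, p.2] [p.1, '*', p.2]) from by
        rw [PySem.Str.replace]; simp]
    simp

-- ===== VERDICT (by name: the statement is the Claim_ definition above) =====
theorem clean_bedmas_spec : Claim_equal_clean_bedmas := by
  intro s _
  unfold Spec_clean_bedmas clean_bedmas clean_bedmas_alt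
  dsimp only
  have hs1 : (PySem.Str.replace s " " "").toList = s.toList.filter (· ≠ ' ') := by
    rw [PySem.Str.toList_replace]
    rw [show (" " : String).toList = [' '] from rfl, show ("" : String).toList = [] from rfl]
    exact replace_space s.toList
  rw [show ((0 : Int)) = ((0 : Nat) : Int) from rfl]
  rw [indicesA (PySem.Str.replace s " " "") 0 []]
  rw [List.nil_append, fold_str_replace, hs1]
  rw [foldB s.toList [] none, List.nil_append]
  congr 1
  set t := s.toList.filter (· ≠ ' ') with ht
  simp only [replace_rep2]
  have h0 := fold_mark_invariant t 0 (t.map (fun c => (c, false)))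
    (by simp [Function.comp_def]) (good_init t)
    (fun j _ => Or.inl (Nat.zero_le j))
  have hfold := fold_rep2_weave (pairsFrom t 0) (t.map (fun c => (c, false)))
    (fun p hp => pairsFrom_mem t 0 p hp)
  rw [weave_init] at hfold
  rw [hfold]
  rw [weave_full _ h0.2.1 (fun j hj => h0.2.2 j (by rw [h0.1] at hj; exact hj)), h0.1]
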